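-- pv_equiv track=rewrite | github.com/Ashishkumar448/GFG-Problem-of-the-day | 2025-07-July-GFG-POTD/July 10 - Find the longest string/Solution.py | longestString
-- ===== SOURCE A (Python) =====
-- from collections import deque, defaultdict
--
-- class TrieNode:
--     def __init__(self):
--         self.children = {}
--         self.is_end = False
--         self.word = ""
--
-- def longestString(arr):
--     root = TrieNode()
--
--     # Insert all words into the Trie
--     for word in arr:
--         curr = root
--         for ch in word:
--             if ch not in curr.children:
--                 curr.children[ch] = TrieNode()
--             curr = curr.children[ch]
--         curr.is_end = True
--         curr.word = word
--
--     # BFS to find the longest valid string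
--     result = ""
--     queue = deque([root])
--
--     while queue:
--         curr = queue.popleft()
--
--         for ch in sorted(curr.children.keys()):
--             next_node = curr.children[ch]
--             if next_node.is_end:
--                 queue.append(next_node)
--                 if (len(next_node.word) > len(result) or
--                     (len(next_node.word) == len(result) and next_node.word < result)):
--                     result = next_node.word
--
--     return result
-- ===== SOURCE B (Python) =====
-- def longestString(arr):
--     words = set(arr)
--     result = ""
--     for word in arr:
--         if all(word[:i] in words for i in range(1, len(word) + 1)):
--             if len(word) > len(result) or (len(word) == len(result) and word < result):
--                 result = word
--     return result
-- ===== Notes on version B (the rewrite author's own statement) =====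
-- stated objective: simpler
-- what changed: Replaced the trie construction plus BFS over is_end chains by a single pass over the list with a prebuilt hash set: a word is kept iff every prefix (including itself) is in the set, and the running best is updated by the same longest-then-lexicographically-smallest rule, which is order-independent.
import Mathlib
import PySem

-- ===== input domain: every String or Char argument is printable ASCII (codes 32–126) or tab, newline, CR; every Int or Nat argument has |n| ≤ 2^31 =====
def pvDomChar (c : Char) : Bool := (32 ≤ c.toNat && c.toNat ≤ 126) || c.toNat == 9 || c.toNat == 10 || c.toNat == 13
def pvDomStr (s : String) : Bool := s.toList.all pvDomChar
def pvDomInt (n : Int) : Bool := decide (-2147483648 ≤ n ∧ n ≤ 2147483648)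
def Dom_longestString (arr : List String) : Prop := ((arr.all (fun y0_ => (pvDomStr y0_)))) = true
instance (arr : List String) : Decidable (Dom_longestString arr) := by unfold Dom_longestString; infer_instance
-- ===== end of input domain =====

-- B replaces A's trie + BFS by one pass over the list with a prebuilt set of words,
-- testing every prefix by set membership; objective: simpler. Equivalence of RETURN values.

-- Shared by both ports: the literal update condition both Pythons use for `result`
-- ('len(w) > len(result) or (len(w) == len(result) and w < result)'); Python's str '<'
-- is Lean's '<' on List Char (code points).
def pvUpd (res w : List Char) : List Char :=
  if w.length > res.length ∨ (w.length = res.length ∧ w < res) then w else res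

-- ===== PORT A =====
-- A's TrieNode graph is encoded by its paths: the trie is a Dict from the path (List Char,
-- the unique 'pointer' to a node) to the node's data; `children` holds the node's child
-- edge labels in insertion order, exactly the keys of Python's per-node children dict.
structure PVNode where
  children : List Char
  isEnd : Bool
  word : List Char
deriving Repr, DecidableEq

def pvNode0 : PVNode := ⟨[], false, []⟩

def pvInsertWord (S : PySem.Dict (List Char) PVNode) (word : String) :
    PySem.Dict (List Char) PVNode :=
  let st := word.toList.foldl
    (fun (st : PySem.Dict (List Char) PVNode × List Char) ch =>
      let S := st.1
      let curr := st.2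
      let S := if (S.getD curr pvNode0).children.contains ch then S
        else (S.insert (curr ++ [ch]) pvNode0).modify curr pvNode0
              (fun nd => ⟨nd.children ++ [ch], nd.isEnd, nd.word⟩)
      (S, curr ++ [ch]))
    (S, [])
  st.1.modify st.2 pvNode0 (fun nd => ⟨nd.children, true, word.toList⟩)

def pvBuild (arr : List String) : PySem.Dict (List Char) PVNode :=
  arr.foldl pvInsertWord (PySem.Dict.empty.insert [] pvNode0)

-- the while-queue loop, with fuel that provably suffices (guard for totality only)
def pvBFS (S : PySem.Dict (List Char) PVNode) :
    Nat → List (List Char) → List Char → List Char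
  | 0, _, res => res
  | _ + 1, [], res => res
  | fuel + 1, p :: qs, res =>
    let nd := S.getD p pvNode0
    let st := (PySem.List.sorted nd.children (fun c => c) false).foldl
      (fun (acc : List (List Char) × List Char) ch =>
        let child := S.getD (p ++ [ch]) pvNode0
        if child.isEnd then (acc.1 ++ [p ++ [ch]], pvUpd acc.2 child.word) else acc)
      ([], res)
    pvBFS S fuel (qs ++ st.1) st.2

def longestString (arr : List String) : String :=
  let S := pvBuild arr
  String.ofList (pvBFS S S.size [[]] [])

-- ===== PORT B =====
def longestString_alt (arr : List String) : String :=
  let words : PySem.Set (List Char) := PySem.Set.ofList (arr.map String.toList)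
  String.ofList (arr.foldl
    (fun res word =>
      let w := word.toList
      if (PySem.List.pyRange 1 ((w.length : Int) + 1) 1).all
          (fun i => PySem.Set.contains words (PySem.List.slice w none (some i)))
      then pvUpd res w else res)
    [])

-- ===== PRECONDITION & SPEC =====
def Spec_longestString (arr : List String) (out : String) : Prop := out = longestString_alt arr
instance (arr : List String) (out : String) : Decidable (Spec_longestString arr out) := by unfold Spec_longestString; infer_instance

-- ===== CLAIM (what is proved, stated in full; the proofs are below) =====
def Claim_equal_longestString : Prop := ∀ (arr : List String), Dom_longestString arr → Spec_longestString arr (longestString arr)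

-- ===== LEMMAS AND PROOFS =====

-- Everything below supports the proof only.

-- abbreviation for the trie store
def PVStore : Type := PySem.Dict (List Char) PVNode

-- ---------- pvUpd as the maximum of a linear preference order ----------

-- `pvGe a x` : x does not displace a (a is at least as preferred)
def pvGe (a x : List Char) : Prop :=
  ¬ (a.length < x.length ∨ (x.length = a.length ∧ x < a))

lemma pvGe_refl (a : List Char) : pvGe a a := by
  simp [pvGe]

lemma pvGe_antisymm (a b : List Char) (h1 : pvGe a b) (h2 : pvGe b a) : a = b := by
  unfold pvGe at h1 h2
  push_neg at h1 h2
  exact le_antisymm (h1.2 (by omega)) (h2.2 (by omega))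

lemma pvGe_trans (a b c : List Char) (h1 : pvGe a b) (h2 : pvGe b c) : pvGe a c := by
  unfold pvGe at *
  push_neg at *
  exact ⟨by omega, fun hlen => le_trans (h1.2 (by omega)) (h2.2 (by omega))⟩

lemma pvUpd_cases (r w : List Char) : pvUpd r w = r ∨ pvUpd r w = w := by
  unfold pvUpd; split <;> simp

lemma pvUpd_ge_left (r w : List Char) : pvGe (pvUpd r w) r := by
  unfold pvUpd; split
  · rename_i h
    unfold pvGe
    push_neg
    rcases h with h | h
    · exact ⟨by omega, fun hlen => by omega⟩
    · exact ⟨by omega, fun _ => le_of_lt h.2⟩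
  · exact pvGe_refl r

lemma pvUpd_ge_right (r w : List Char) : pvGe (pvUpd r w) w := by
  unfold pvUpd; split
  · exact pvGe_refl w
  · rename_i h
    exact h

lemma pvUpd_nil (r : List Char) : pvUpd r [] = r := by
  unfold pvUpd
  split
  · rename_i h
    rcases h with h | ⟨h1, h2⟩
    · simp at h
    · have hr : r = [] := List.length_eq_zero_iff.mp (by simpa using h1.symm)
      subst hr
      exact absurd h2 (lt_irrefl [])
  · rfl

lemma pvFold_mem (r : List Char) (l : List (List Char)) :
    List.foldl pvUpd r l = r ∨ List.foldl pvUpd r l ∈ l := by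
  induction l generalizing r with
  | nil => simp
  | cons x t ih =>
    simp only [List.foldl_cons]
    rcases ih (pvUpd r x) with h | h
    · rcases pvUpd_cases r x with h2 | h2
      · left; rw [h, h2]
      · right; rw [h, h2]; simp
    · right; simp [h]

lemma pvFold_ge (r : List Char) (l : List (List Char)) :
    ∀ x, (x = r ∨ x ∈ l) → pvGe (List.foldl pvUpd r l) x := by
  induction l generalizing r with
  | nil =>
    intro x hx
    simp only [List.foldl_nil]
    rcases hx with hx | hx
    · exact hx ▸ pvGe_refl r
    · simp at hx
  | cons y t ih =>
    intro x hx
    simp only [List.foldl_cons]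
    rcases hx with hx | hx
    · exact pvGe_trans _ _ _ (ih (pvUpd r y) _ (Or.inl rfl)) (hx ▸ pvUpd_ge_left r y)
    · rw [List.mem_cons] at hx
      rcases hx with hx | hx
      · exact pvGe_trans _ _ _ (ih (pvUpd r y) _ (Or.inl rfl)) (hx ▸ pvUpd_ge_right r y)
      · exact ih (pvUpd r y) x (Or.inr hx)

lemma pvFold_set (r : List Char) (l1 l2 : List (List Char))
    (h : ∀ x, x ∈ l1 ↔ x ∈ l2) :
    List.foldl pvUpd r l1 = List.foldl pvUpd r l2 := by
  apply pvGe_antisymm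
  · apply pvFold_ge
    rcases pvFold_mem r l2 with h2 | h2
    · exact Or.inl h2
    · exact Or.inr ((h _).mpr h2)
  · apply pvFold_ge
    rcases pvFold_mem r l1 with h1 | h1
    · exact Or.inl h1
    · exact Or.inr ((h _).mp h1)

lemma pvFold_filter_nil (r : List Char) (l : List (List Char)) :
    List.foldl pvUpd r l = List.foldl pvUpd r (l.filter (fun w => !w.isEmpty)) := by
  induction l generalizing r with
  | nil => rfl
  | cons x t ih =>
    by_cases hx : x = []
    · simp [hx, pvUpd_nil, List.filter, ih]
    · have : (!x.isEmpty) = true := by simp [hx]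
      simp only [List.foldl_cons, List.filter_cons, this, if_true]
      simp [ih]

-- ---------- characterization of port B ----------

def pvArrL (arr : List String) : List (List Char) := arr.map String.toList

def pvValidB (arr : List String) (w : List Char) : Bool :=
  (List.range w.length).all (fun j => decide (w.take (j + 1) ∈ pvArrL arr))

lemma pvCond_eq (arr : List String) (w : List Char) :
    ((PySem.List.pyRange 1 ((w.length : Int) + 1) 1).all
      (fun i => PySem.Set.contains (PySem.Set.ofList (arr.map String.toList))
        (PySem.List.slice w none (some i)))) = pvValidB arr w := by
  rw [Bool.eq_iff_iff]
  rw [List.all_eq_true, pvValidB, List.all_eq_true]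
  constructor
  · intro hall j hj
    rw [List.mem_range] at hj
    have h1 : ((j + 1 : Nat) : Int) ∈ PySem.List.pyRange 1 ((w.length : Int) + 1) 1 := by
      rw [PySem.List.mem_pyRange_one]
      constructor
      · omega
      · push_cast
        omega
    have h2 := hall _ h1
    rw [PySem.List.slice_to_natCast] at h2
    simp only [decide_eq_true_eq]
    have h3 : w.take (j + 1) ∈ PySem.Set.ofList (arr.map String.toList) := by
      simpa [PySem.Set.contains] using h2
    rw [PySem.Set.mem_ofList] at h3
    exact h3
  · intro hall i hi
    rw [PySem.List.mem_pyRange_one] at hi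
    have hcast : i = ((i.toNat : Nat) : Int) := (Int.toNat_of_nonneg (by omega)).symm
    rw [hcast, PySem.List.slice_to_natCast]
    have hj : i.toNat - 1 ∈ List.range w.length := by
      rw [List.mem_range]
      omega
    have h2 := hall _ hj
    simp only [decide_eq_true_eq] at h2
    have hjj : i.toNat - 1 + 1 = i.toNat := by omega
    rw [hjj] at h2
    simp only [PySem.Set.contains]
    rw [List.contains_iff_mem, PySem.Set.mem_ofList]
    exact h2

lemma pvB_eq (arr : List String) :
    longestString_alt arr =
      String.ofList (List.foldl pvUpd [] ((pvArrL arr).filter (pvValidB arr))) := by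
  unfold longestString_alt
  dsimp only
  congr 1
  rw [PySem.List.foldl_congr_mem arr _
    (fun res word => if pvValidB arr word.toList then pvUpd res word.toList else res) []
    (fun acc x _ => by rw [pvCond_eq arr x.toList])]
  rw [PySem.List.foldl_if_eq_foldl_filter (fun word => pvValidB arr word.toList)
    (fun acc x => pvUpd acc x.toList) arr []]
  unfold pvArrL
  rw [show (fun word => pvValidB arr word.toList) = (pvValidB arr ∘ String.toList) from rfl]
  rw [List.filter_map, List.foldl_map]

-- ---------- the trie invariant ----------

structure PVInv (S : PySem.Dict (List Char) PVNode) (L : List (List Char)) : Prop where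
  nodup : S.keys.Nodup
  root : S.contains [] = true
  keys_iff : ∀ p : List Char, p ≠ [] → (S.contains p = true ↔ ∃ w ∈ L, p <+: w)
  isEnd_iff : ∀ p : List Char, S.contains p = true →
    ((S.getD p pvNode0).isEnd = true ↔ p ∈ L)
  word_eq : ∀ p : List Char, S.contains p = true →
    (S.getD p pvNode0).isEnd = true → (S.getD p pvNode0).word = p
  child_iff : ∀ p : List Char, S.contains p = true →
    ∀ c : Char, (c ∈ (S.getD p pvNode0).children ↔ S.contains (p ++ [c]) = true)
  child_nodup : ∀ p : List Char, (S.getD p pvNode0).children.Nodup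

lemma pvInv_contains_prefix {S : PySem.Dict (List Char) PVNode} {L : List (List Char)}
    (h : PVInv S L) {p q : List Char} (hp : S.contains p = true) (hq : q <+: p) :
    S.contains q = true := by
  by_cases hqe : q = []
  · exact hqe ▸ h.root
  · by_cases hpe : p = []
    · exact absurd (hpe ▸ hq) (by simp [List.prefix_nil]; exact hqe)
    · obtain ⟨w, hw, hpw⟩ := (h.keys_iff p hpe).mp hp
      exact (h.keys_iff q hqe).mpr ⟨w, hw, hq.trans hpw⟩

lemma pvInv_init : PVInv (PySem.Dict.empty.insert ([] : List Char) pvNode0) [] := by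
  constructor
  · exact PySem.Dict.nodup_keys_insert _ _ _ PySem.Dict.nodup_keys_empty
  · simp
  · intro p hp
    simp [PySem.Dict.contains_insert, hp]
  · intro p hp
    rw [PySem.Dict.getD_insert, PySem.Dict.getD_empty]
    refine iff_of_false ?_ (by simp)
    split <;> simp [pvNode0]
  · intro p hp hE
    exfalso
    rw [PySem.Dict.getD_insert, PySem.Dict.getD_empty] at hE
    revert hE
    split <;> simp [pvNode0]
  · intro p hp c
    rw [PySem.Dict.getD_insert, PySem.Dict.getD_empty]
    have h1 : PySem.Dict.contains (PySem.Dict.empty.insert ([] : List Char) pvNode0) (p ++ [c]) = false := by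
      simp [PySem.Dict.contains_insert, PySem.Dict.contains_empty]
    rw [h1]
    split <;> simp [pvNode0]
  · intro p
    rw [PySem.Dict.getD_insert, PySem.Dict.getD_empty]
    split <;> simp [pvNode0]

structure PVMid (S0 S : PySem.Dict (List Char) PVNode) (L : List (List Char))
    (u : List Char) : Prop where
  nodup : S.keys.Nodup
  keysome : ∀ p : List Char,
    (S.contains p = true ↔ (S0.contains p = true ∨ (p ≠ [] ∧ p <+: u)))
  root : S.contains [] = true
  hu : S.contains u = true
  isEnd_iff : ∀ p : List Char, S.contains p = true →
    ((S.getD p pvNode0).isEnd = true ↔ p ∈ L)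
  word_eq : ∀ p : List Char, S.contains p = true →
    (S.getD p pvNode0).isEnd = true → (S.getD p pvNode0).word = p
  child_iff : ∀ p : List Char, S.contains p = true →
    ∀ c : Char, (c ∈ (S.getD p pvNode0).children ↔ S.contains (p ++ [c]) = true)
  child_nodup : ∀ p : List Char, (S.getD p pvNode0).children.Nodup

lemma pvMid_init {S0 : PySem.Dict (List Char) PVNode} {L : List (List Char)}
    (h : PVInv S0 L) : PVMid S0 S0 L [] := by
  refine ⟨h.nodup, ?_, h.root, h.root, h.isEnd_iff, h.word_eq, h.child_iff, h.child_nodup⟩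
  intro p
  constructor
  · exact fun hp => Or.inl hp
  · rintro (hp | ⟨hne, hpre⟩)
    · exact hp
    · exact absurd (List.prefix_nil.mp hpre) hne

lemma pvMid_step {S0 S : PySem.Dict (List Char) PVNode} {L : List (List Char)}
    {u : List Char} (h0 : PVInv S0 L) (h : PVMid S0 S L u) (ch : Char) :
    PVMid S0
      (if (S.getD u pvNode0).children.contains ch then S
       else (S.insert (u ++ [ch]) pvNode0).modify u pvNode0
              (fun nd => ⟨nd.children ++ [ch], nd.isEnd, nd.word⟩))
      L (u ++ [ch]) := by
  by_cases hch : (S.getD u pvNode0).children.contains ch = true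
  · rw [if_pos hch]
    have hq : S.contains (u ++ [ch]) = true :=
      (h.child_iff u h.hu ch).mp (List.contains_iff_mem.mp hch)
    refine ⟨h.nodup, ?_, h.root, hq, h.isEnd_iff, h.word_eq, h.child_iff, h.child_nodup⟩
    intro p
    rw [h.keysome p]
    constructor
    · rintro (hp | ⟨hne, hpre⟩)
      · exact Or.inl hp
      · exact Or.inr ⟨hne, hpre.trans (List.prefix_append u [ch])⟩
    · rintro (hp | ⟨hne, hpre⟩)
      · exact Or.inl hp
      · rcases List.prefix_concat_iff.mp hpre with heq | hpre'
        · rcases (h.keysome (u ++ [ch])).mp hq with hp0 | ⟨_, hpu⟩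
          · exact Or.inl (heq ▸ hp0)
          · exfalso
            have := hpu.length_le
            simp at this
        · exact Or.inr ⟨hne, hpre'⟩
  · rw [if_neg hch]
    have hchm : ch ∉ (S.getD u pvNode0).children :=
      fun hm => hch (List.contains_iff_mem.mpr hm)
    have hq : S.contains (u ++ [ch]) = false := by
      cases hcq : S.contains (u ++ [ch]) with
      | false => rfl
      | true => exact absurd ((h.child_iff u h.hu ch).mpr hcq) hchm
    have huq : u ≠ u ++ [ch] := by simp
    have hqne : u ++ [ch] ≠ [] := by simp
    have hq0 : S0.contains (u ++ [ch]) = false := by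
      cases hc : S0.contains (u ++ [ch]) with
      | false => rfl
      | true =>
        have := (h.keysome (u ++ [ch])).mpr (Or.inl hc)
        rw [hq] at this
        exact absurd this (by simp)
    have hqL : (u ++ [ch]) ∉ L := by
      intro hin
      have := (h0.keys_iff (u ++ [ch]) hqne).mpr ⟨u ++ [ch], hin, List.prefix_refl _⟩
      rw [hq0] at this
      exact absurd this (by simp)
    have hcont : ∀ p : List Char,
        (((S.insert (u ++ [ch]) pvNode0).modify u pvNode0
          (fun nd => ⟨nd.children ++ [ch], nd.isEnd, nd.word⟩)).contains p = true
        ↔ (p = u ++ [ch] ∨ S.contains p = true)) := by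
      intro p
      rw [PySem.Dict.contains_modify, PySem.Dict.contains_insert]
      simp only [Bool.or_eq_true, beq_iff_eq]
      constructor
      · rintro (hp | hp | hp)
        · exact Or.inr (hp ▸ h.hu)
        · exact Or.inl hp
        · exact Or.inr hp
      · rintro (hp | hp)
        · exact Or.inr (Or.inl hp)
        · exact Or.inr (Or.inr hp)
    have hget : ∀ p : List Char,
        ((S.insert (u ++ [ch]) pvNode0).modify u pvNode0
          (fun nd => ⟨nd.children ++ [ch], nd.isEnd, nd.word⟩)).getD p pvNode0 =
        if p = u then ⟨(S.getD u pvNode0).children ++ [ch],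
            (S.getD u pvNode0).isEnd, (S.getD u pvNode0).word⟩
        else if p = u ++ [ch] then pvNode0 else S.getD p pvNode0 := by
      intro p
      rw [PySem.Dict.getD_modify, PySem.Dict.getD_insert, PySem.Dict.getD_insert,
        if_neg huq]
    refine ⟨?_, ?_, ?_, ?_, ?_, ?_, ?_, ?_⟩
    · rw [PySem.Dict.keys_modify]
      exact PySem.Dict.nodup_keys_insert _ _ _
        (PySem.Dict.nodup_keys_insert _ _ _ h.nodup)
    · intro p
      rw [hcont p, h.keysome p]
      constructor
      · rintro (rfl | hp | ⟨hne, hpre⟩)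
        · exact Or.inr ⟨hqne, List.prefix_refl _⟩
        · exact Or.inl hp
        · exact Or.inr ⟨hne, hpre.trans (List.prefix_append u [ch])⟩
      · rintro (hp | ⟨hne, hpre⟩)
        · exact Or.inr (Or.inl hp)
        · rcases List.prefix_concat_iff.mp hpre with heq | hpre'
          · exact Or.inl heq
          · exact Or.inr (Or.inr ⟨hne, hpre'⟩)
    · exact (hcont []).mpr (Or.inr h.root)
    · exact (hcont (u ++ [ch])).mpr (Or.inl rfl)
    · intro p hp
      rw [hget p]
      split_ifs with h1 h2
      · rw [h1]
        exact h.isEnd_iff u h.hu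
      · rw [h2]
        exact iff_of_false (by simp [pvNode0]) hqL
      · have hp' : S.contains p = true := by
          rcases (hcont p).mp hp with heq | hp'
          · exact absurd heq h2
          · exact hp'
        exact h.isEnd_iff p hp'
    · intro p hp hE
      rw [hget p] at hE ⊢
      split_ifs at hE ⊢ with h1 h2
      · rw [h1]
        exact h.word_eq u h.hu (by simpa using hE)
      · simp [pvNode0] at hE
      · have hp' : S.contains p = true := by
          rcases (hcont p).mp hp with heq | hp'
          · exact absurd heq h2
          · exact hp'
        exact h.word_eq p hp' hE
    · intro p hp c
      rw [hget p, hcont (p ++ [c])]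
      split_ifs with h1 h2
      · rw [h1]
        have hcq : u ++ [c] = u ++ [ch] ↔ c = ch := by
          constructor
          · intro e
            have := List.append_cancel_left e
            simpa using this
          · intro e
            rw [e]
        have hmm : (c ∈ (⟨(S.getD u pvNode0).children ++ [ch],
              (S.getD u pvNode0).isEnd, (S.getD u pvNode0).word⟩ : PVNode).children)
            ↔ (c ∈ (S.getD u pvNode0).children ∨ c = ch) := by
          simp
        rw [hmm, h.child_iff u h.hu c]
        constructor
        · rintro (hc | hc)
          · exact Or.inr hc
          · exact Or.inl (hcq.mpr hc)
        · rintro (hc | hc)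
          · exact Or.inr (hcq.mp hc)
          · exact Or.inl hc
      · subst h2
        refine iff_of_false (by simp [pvNode0]) ?_
        rintro (he | hc)
        · have := congrArg List.length he
          simp at this
        · rcases (h.keysome _).mp hc with hc0 | ⟨_, hpre⟩
          · have := pvInv_contains_prefix h0 hc0 (List.prefix_append (u ++ [ch]) [c])
            rw [hq0] at this
            exact absurd this (by simp)
          · have := hpre.length_le
            simp at this
      · have hp' : S.contains p = true := by
          rcases (hcont p).mp hp with heq | hp'
          · exact absurd heq h2
          · exact hp'
        rw [h.child_iff p hp' c]
        constructor
        · intro hc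
          exact Or.inr hc
        · rintro (he | hc)
          · exact absurd (List.append_inj_left' he rfl) h1
          · exact hc
    · intro p
      rw [hget p]
      split_ifs with h1 h2
      · have hnd := h.child_nodup u
        simp only []
        rw [List.nodup_append]
        refine ⟨hnd, by simp, ?_⟩
        intro a ha b hb e
        rw [List.mem_singleton] at hb
        exact hchm ((e.trans hb) ▸ ha)
      · simp [pvNode0]
      · exact h.child_nodup p

lemma pvMid_fold {S0 : PySem.Dict (List Char) PVNode} {L : List (List Char)}
    (h0 : PVInv S0 L) (v : List Char) :
    ∀ (S : PySem.Dict (List Char) PVNode) (u : List Char), PVMid S0 S L u →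
      (v.foldl
        (fun (st : PySem.Dict (List Char) PVNode × List Char) ch =>
          let S := st.1
          let curr := st.2
          let S := if (S.getD curr pvNode0).children.contains ch then S
            else (S.insert (curr ++ [ch]) pvNode0).modify curr pvNode0
                  (fun nd => ⟨nd.children ++ [ch], nd.isEnd, nd.word⟩)
          (S, curr ++ [ch])) (S, u)).2 = u ++ v ∧
      PVMid S0
        (v.foldl
          (fun (st : PySem.Dict (List Char) PVNode × List Char) ch =>
            let S := st.1
            let curr := st.2
            let S := if (S.getD curr pvNode0).children.contains ch then S
              else (S.insert (curr ++ [ch]) pvNode0).modify curr pvNode0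
                    (fun nd => ⟨nd.children ++ [ch], nd.isEnd, nd.word⟩)
            (S, curr ++ [ch])) (S, u)).1 L (u ++ v) := by
  induction v with
  | nil => intro S u h; exact ⟨by simp, by simpa using h⟩
  | cons c t ih =>
    intro S u h
    have hstep := pvMid_step h0 h c
    have := ih _ (u ++ [c]) hstep
    constructor
    · simpa using this.1
    · simpa using this.2

lemma pvMid_finish {S0 T : PySem.Dict (List Char) PVNode} {L : List (List Char)}
    {wl : List Char} (h0 : PVInv S0 L) (hmid : PVMid S0 T L wl) :
    PVInv (T.modify wl pvNode0 (fun nd => ⟨nd.children, true, wl⟩)) (L ++ [wl]) := by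
  have hcont : ∀ p : List Char,
      ((T.modify wl pvNode0 (fun nd => ⟨nd.children, true, wl⟩)).contains p = true
        ↔ T.contains p = true) := by
    intro p
    rw [PySem.Dict.contains_modify]
    simp only [Bool.or_eq_true, beq_iff_eq]
    constructor
    · rintro (rfl | hp)
      · exact hmid.hu
      · exact hp
    · exact fun hp => Or.inr hp
  have hget : ∀ p : List Char,
      ((T.modify wl pvNode0 (fun nd => ⟨nd.children, true, wl⟩)).getD p pvNode0 =
        if p = wl then ⟨(T.getD wl pvNode0).children, true, wl⟩ else T.getD p pvNode0) := by
    intro p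
    rw [PySem.Dict.getD_modify]
  refine ⟨?_, ?_, ?_, ?_, ?_, ?_, ?_⟩
  · rw [PySem.Dict.keys_modify]
    exact PySem.Dict.nodup_keys_insert _ _ _ hmid.nodup
  · exact (hcont []).mpr hmid.root
  · intro p hne
    rw [hcont p, hmid.keysome p, h0.keys_iff p hne]
    constructor
    · rintro (⟨w', hw', hpw⟩ | ⟨_, hpre⟩)
      · exact ⟨w', List.mem_append_left _ hw', hpw⟩
      · exact ⟨wl, List.mem_append_right _ (by simp), hpre⟩
    · rintro ⟨w', hw', hpw⟩
      rcases List.mem_append.mp hw' with hw' | hw'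
      · exact Or.inl ⟨w', hw', hpw⟩
      · rw [List.mem_singleton] at hw'
        exact Or.inr ⟨hne, hw' ▸ hpw⟩
  · intro p hp
    rw [hget p]
    split_ifs with h1
    · rw [h1]
      exact iff_of_true rfl (by simp)
    · rw [hmid.isEnd_iff p ((hcont p).mp hp)]
      simp [List.mem_append, h1]
  · intro p hp hE
    rw [hget p] at hE ⊢
    split_ifs at hE ⊢ with h1
    · rw [h1]
    · exact hmid.word_eq p ((hcont p).mp hp) hE
  · intro p hp c
    rw [hget p, hcont (p ++ [c])]
    split_ifs with h1
    · rw [h1]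
      exact hmid.child_iff wl hmid.hu c
    · exact hmid.child_iff p ((hcont p).mp hp) c
  · intro p
    rw [hget p]
    split_ifs with h1
    · exact hmid.child_nodup wl
    · exact hmid.child_nodup p

lemma pvInv_insert {S : PySem.Dict (List Char) PVNode} {L : List (List Char)}
    (h : PVInv S L) (w : String) : PVInv (pvInsertWord S w) (L ++ [w.toList]) := by
  have hmain := pvMid_fold h w.toList S [] (pvMid_init h)
  simp only [List.nil_append] at hmain
  obtain ⟨h2, hmid⟩ := hmain
  unfold pvInsertWord
  dsimp only
  rw [h2]
  exact pvMid_finish h hmid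

lemma pvInv_build (arr : List String) : PVInv (pvBuild arr) (pvArrL arr) := by
  unfold pvBuild pvArrL
  induction arr using List.reverseRecOn with
  | nil => exact pvInv_init
  | append_singleton t x ih =>
    simp only [List.foldl_append, List.foldl_cons, List.foldl_nil, List.map_append]
    exact pvInv_insert ih x

-- ---------- descendants of a trie node along is_end chains ----------

def pvKids (S : PySem.Dict (List Char) PVNode) (p : List Char) : List Char :=
  PySem.List.sorted (S.getD p pvNode0).children (fun c => c) false

def pvDesc (S : PySem.Dict (List Char) PVNode) (M : Nat) (p : List Char) :
    List (List Char) :=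
  if M ≤ p.length then []
  else (pvKids S p).flatMap (fun c =>
    if (S.getD (p ++ [c]) pvNode0).isEnd then (p ++ [c]) :: pvDesc S M (p ++ [c]) else [])
termination_by M - p.length
decreasing_by simp; omega

def pvKidsEnd (S : PySem.Dict (List Char) PVNode) (p : List Char) : List Char :=
  (pvKids S p).filter (fun c => (S.getD (p ++ [c]) pvNode0).isEnd)

def pvNewq (S : PySem.Dict (List Char) PVNode) (p : List Char) : List (List Char) :=
  (pvKidsEnd S p).map (fun c => p ++ [c])

lemma pvFlatMap_if {α β : Type} (l : List α) (P : α → Bool) (g : α → List β) :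
    l.flatMap (fun c => if P c then g c else []) = (l.filter P).flatMap g := by
  induction l with
  | nil => rfl
  | cons x t ih =>
    by_cases hx : P x <;> simp [List.flatMap_cons, hx, ih]

lemma pvFlatMap_cons_length {α β : Type} (l : List α) (g h : α → List β) :
    (l.flatMap (fun c => g c ++ h c)).length
      = (l.flatMap g).length + (l.flatMap h).length := by
  induction l with
  | nil => rfl
  | cons x t ih => simp [List.flatMap_cons, ih]; omega

lemma pvDesc_eq_flat (S : PySem.Dict (List Char) PVNode) (M : Nat) (p : List Char)
    (hp : p.length < M) :
    pvDesc S M p = (pvKidsEnd S p).flatMap (fun c => (p ++ [c]) :: pvDesc S M (p ++ [c])) := by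
  rw [pvDesc, if_neg (by omega)]
  exact pvFlatMap_if _ _ _

lemma pvDesc_mem (S : PySem.Dict (List Char) PVNode) (M : Nat) (p : List Char)
    (hp : p.length < M) (x : List Char) :
    x ∈ pvDesc S M p ↔ (x ∈ pvNewq S p ∨ ∃ q ∈ pvNewq S p, x ∈ pvDesc S M q) := by
  rw [pvDesc_eq_flat S M p hp]
  simp only [pvNewq, List.mem_flatMap, List.mem_map, List.mem_cons]
  constructor
  · rintro ⟨c, hc, hx | hx⟩
    · exact Or.inl ⟨c, hc, hx.symm⟩
    · exact Or.inr ⟨p ++ [c], ⟨c, hc, rfl⟩, hx⟩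
  · rintro (⟨c, hc, hx⟩ | ⟨q, ⟨c, hc, hq⟩, hx⟩)
    · exact ⟨c, hc, Or.inl hx.symm⟩
    · exact ⟨c, hc, Or.inr (hq ▸ hx)⟩

lemma pvDesc_length (S : PySem.Dict (List Char) PVNode) (M : Nat) (p : List Char)
    (hp : p.length < M) :
    (pvDesc S M p).length
      = (pvNewq S p).length + ((pvNewq S p).flatMap (pvDesc S M)).length := by
  rw [pvDesc_eq_flat S M p hp]
  have h1 : ∀ c : Char, ((p ++ [c]) :: pvDesc S M (p ++ [c]))
      = [p ++ [c]] ++ pvDesc S M (p ++ [c]) := fun c => rfl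
  simp only [h1]
  rw [pvFlatMap_cons_length]
  simp [pvNewq, List.flatMap_map]

-- ---------- key properties of pvDesc over a well-formed trie ----------

lemma pvBrand {p x : List Char} {c : Char} (h : (p ++ [c]) <+: x) :
    x[p.length]? = some c := by
  obtain ⟨t, rfl⟩ := h
  rw [List.append_assoc, List.getElem?_append_right (by simp)]
  simp

lemma pvKidsEnd_nodup {S : PySem.Dict (List Char) PVNode} {L : List (List Char)}
    (h : PVInv S L) (p : List Char) : (pvKidsEnd S p).Nodup := by
  apply List.Nodup.filter
  exact (PySem.List.sorted_perm (S.getD p pvNode0).children (fun c => c) false).nodup_iff.mpr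
    (h.child_nodup p)

lemma pvKidsEnd_mem {S : PySem.Dict (List Char) PVNode} {L : List (List Char)}
    (h : PVInv S L) (p : List Char) (hp : S.contains p = true) (c : Char)
    (hc : c ∈ pvKidsEnd S p) :
    S.contains (p ++ [c]) = true ∧ (S.getD (p ++ [c]) pvNode0).isEnd = true := by
  have h1 := List.mem_filter.mp hc
  have h2 : c ∈ (S.getD p pvNode0).children := by
    have := h1.1
    rw [pvKids, PySem.List.mem_sorted] at this
    exact this
  exact ⟨(h.child_iff p hp c).mp h2, by simpa using h1.2⟩

lemma pvDesc_props {S : PySem.Dict (List Char) PVNode} {L : List (List Char)}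
    (h : PVInv S L) (M : Nat) (hM : ∀ p : List Char, S.contains p = true → p.length < M) :
    ∀ (n : Nat) (p : List Char), M - p.length ≤ n → S.contains p = true →
      (∀ q ∈ pvDesc S M p, S.contains q = true ∧ (S.getD q pvNode0).isEnd = true ∧
        p <+: q ∧ p.length < q.length) ∧ (pvDesc S M p).Nodup := by
  intro n
  induction n with
  | zero =>
    intro p hn hp
    exact absurd (hM p hp) (by omega)
  | succ n ih =>
    intro p hn hp
    have hpM := hM p hp
    have hstep : ∀ c ∈ pvKidsEnd S p, ∀ x ∈ (p ++ [c]) :: pvDesc S M (p ++ [c]),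
        S.contains x = true ∧ (S.getD x pvNode0).isEnd = true ∧
          (p ++ [c]) <+: x ∧ p.length < x.length := by
      intro c hc x hx
      obtain ⟨hcc, hcE⟩ := pvKidsEnd_mem h p hp c hc
      rw [List.mem_cons] at hx
      rcases hx with rfl | hx
      · exact ⟨hcc, hcE, List.prefix_refl _, by simp⟩
      · obtain ⟨h1, h2, h3, h4⟩ :=
          (ih (p ++ [c]) (by have := hM _ hcc; simp only [List.length_append,
            List.length_cons, List.length_nil]; omega) hcc).1 x hx
        refine ⟨h1, h2, h3, ?_⟩
        simp only [List.length_append, List.length_cons, List.length_nil] at h4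
        omega
    constructor
    · intro q hq
      rw [pvDesc_eq_flat S M p hpM, List.mem_flatMap] at hq
      obtain ⟨c, hc, hq⟩ := hq
      obtain ⟨h1, h2, h3, h4⟩ := hstep c hc q hq
      exact ⟨h1, h2, (List.prefix_append p [c]).trans h3, h4⟩
    · rw [pvDesc_eq_flat S M p hpM]
      have hnd := pvKidsEnd_nodup h p
      have hsub : ∀ c ∈ pvKidsEnd S p, c ∈ pvKidsEnd S p := fun c hc => hc
      revert hnd hsub
      generalize hks : pvKidsEnd S p = ks0
      have : ∀ ks : List Char, ks.Nodup → (∀ c ∈ ks, c ∈ ks0) →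
          (ks.flatMap (fun c => (p ++ [c]) :: pvDesc S M (p ++ [c]))).Nodup := by
        intro ks
        induction ks with
        | nil => intro _ _; simp
        | cons c t iht =>
          intro hnd hsub
          rw [List.flatMap_cons, List.nodup_append]
          have hcin : c ∈ ks0 := hsub c (List.mem_cons_self ..)
          obtain ⟨hcc, hcE⟩ := pvKidsEnd_mem h p hp c (hks ▸ hcin)
          refine ⟨?_, iht (List.Nodup.of_cons hnd) (fun d hd => hsub d (List.mem_cons_of_mem _ hd)), ?_⟩
          · rw [List.nodup_cons]
            refine ⟨?_, ((ih (p ++ [c]) (by have := hM _ hcc; simp only [List.length_append,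
                List.length_cons, List.length_nil]; omega) hcc).2)⟩
            intro hmem
            have := ((ih (p ++ [c]) (by have := hM _ hcc; simp only [List.length_append,
                List.length_cons, List.length_nil]; omega) hcc).1 _ hmem).2.2.2
            omega
          · intro a ha b hb
            rw [List.mem_flatMap] at hb
            obtain ⟨d, hd, hb⟩ := hb
            have hda : (p ++ [c]) <+: a := by
              rw [List.mem_cons] at ha
              rcases ha with rfl | ha
              · exact List.prefix_refl _
              · exact ((ih (p ++ [c]) (by have := hM _ hcc; simp only [List.length_append,
                  List.length_cons, List.length_nil]; omega) hcc).1 _ ha).2.2.1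
            have hdin : d ∈ ks0 := hsub d (List.mem_cons_of_mem _ hd)
            obtain ⟨hdc, hdE⟩ := pvKidsEnd_mem h p hp d (hks ▸ hdin)
            have hdb : (p ++ [d]) <+: b := by
              rw [List.mem_cons] at hb
              rcases hb with rfl | hb
              · exact List.prefix_refl _
              · exact ((ih (p ++ [d]) (by have := hM _ hdc; simp only [List.length_append,
                  List.length_cons, List.length_nil]; omega) hdc).1 _ hb).2.2.1
            intro hab
            have hcd : c ≠ d := by
              rw [List.nodup_cons] at hnd
              intro e
              exact hnd.1 (e ▸ hd)
            apply hcd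
            have h1 := pvBrand hda
            have h2 := pvBrand hdb
            rw [hab, h2] at h1
            exact (Option.some_inj.mp h1).symm
      intro hnd2 hsub2
      exact this ks0 hnd2 hsub2

lemma pvDesc_chain {S : PySem.Dict (List Char) PVNode} {L : List (List Char)}
    (h : PVInv S L) (M : Nat) (hM : ∀ p : List Char, S.contains p = true → p.length < M) :
    ∀ (n : Nat) (p : List Char), M - p.length ≤ n → S.contains p = true →
      (∀ k : Nat, 1 ≤ k → k ≤ p.length → p.take k ∈ L) →
      ∀ q ∈ pvDesc S M p, q ∈ L ∧ ∀ k : Nat, 1 ≤ k → k ≤ q.length → q.take k ∈ L := by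
  intro n
  induction n with
  | zero =>
    intro p hn hp
    exact absurd (hM p hp) (by omega)
  | succ n ih =>
    intro p hn hp hchain q hq
    rw [pvDesc_eq_flat S M p (hM p hp), List.mem_flatMap] at hq
    obtain ⟨c, hc, hq⟩ := hq
    obtain ⟨hcc, hcE⟩ := pvKidsEnd_mem h p hp c hc
    have hcL : (p ++ [c]) ∈ L := (h.isEnd_iff _ hcc).mp hcE
    have hchain' : ∀ k : Nat, 1 ≤ k → k ≤ (p ++ [c]).length → (p ++ [c]).take k ∈ L := by
      intro k hk1 hk2
      simp only [List.length_append, List.length_cons, List.length_nil] at hk2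
      by_cases hkp : k ≤ p.length
      · rw [List.take_append_of_le_length hkp]
        exact hchain k hk1 hkp
      · have hk : k = p.length + 1 := by omega
        rw [hk, List.take_of_length_le (by simp)]
        exact hcL
    rw [List.mem_cons] at hq
    rcases hq with rfl | hq
    · exact ⟨hcL, hchain'⟩
    · exact ih (p ++ [c]) (by have := hM _ hcc; simp only [List.length_append,
        List.length_cons, List.length_nil]; omega) hcc hchain' q hq

lemma pvDesc_complete {S : PySem.Dict (List Char) PVNode} {L : List (List Char)}
    (h : PVInv S L) (M : Nat) (hM : ∀ p : List Char, S.contains p = true → p.length < M) :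
    ∀ (v p : List Char), S.contains p = true → v ≠ [] → (p ++ v) ∈ L →
      (∀ k : Nat, 1 ≤ k → k ≤ (p ++ v).length → (p ++ v).take k ∈ L) →
      (p ++ v) ∈ pvDesc S M p := by
  intro v
  induction v with
  | nil => intro p _ hne; exact absurd rfl hne
  | cons c v' ih =>
    intro p hp _ hin hchain
    have hqpre : (p ++ [c]) <+: (p ++ (c :: v')) := ⟨v', by simp⟩
    have hqkey : S.contains (p ++ [c]) = true :=
      (h.keys_iff (p ++ [c]) (by simp)).mpr ⟨p ++ (c :: v'), hin, hqpre⟩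
    have htake : (p ++ (c :: v')).take (p.length + 1) = p ++ [c] := by
      rw [List.take_append]
      simp
    have hqL : (p ++ [c]) ∈ L := by
      have := hchain (p.length + 1) (by omega)
        (by simp only [List.length_append, List.length_cons]; omega)
      rwa [htake] at this
    have hqE : (S.getD (p ++ [c]) pvNode0).isEnd = true :=
      (h.isEnd_iff _ hqkey).mpr hqL
    rw [pvDesc_eq_flat S M p (hM p hp), List.mem_flatMap]
    refine ⟨c, ?_, ?_⟩
    · rw [pvKidsEnd, List.mem_filter]
      constructor
      · rw [pvKids, PySem.List.mem_sorted]
        exact (h.child_iff p hp c).mpr hqkey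
      · simpa using hqE
    · cases v' with
      | nil => rw [List.mem_cons]; exact Or.inl (by simp)
      | cons d v'' =>
        rw [List.mem_cons]
        right
        have hassoc : p ++ (c :: d :: v'') = (p ++ [c]) ++ (d :: v'') := by simp
        rw [hassoc] at hin hchain ⊢
        exact ih (p ++ [c]) hqkey (by simp) hin hchain

-- ---------- the BFS loop computes the fold of pvUpd over the descendants ----------

lemma pvStep_eq {S : PySem.Dict (List Char) PVNode} {L : List (List Char)}
    (h : PVInv S L) (p : List Char) (hp : S.contains p = true) (res : List Char) :
    ((PySem.List.sorted (S.getD p pvNode0).children (fun c => c) false).foldl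
      (fun (acc : List (List Char) × List Char) ch =>
        let child := S.getD (p ++ [ch]) pvNode0
        if child.isEnd then (acc.1 ++ [p ++ [ch]], pvUpd acc.2 child.word) else acc)
      ([], res))
    = (pvNewq S p, List.foldl pvUpd res (pvNewq S p)) := by
  have hbody := PySem.List.foldl_congr_mem
    (PySem.List.sorted (S.getD p pvNode0).children (fun c => c) false)
    (fun (acc : List (List Char) × List Char) ch =>
      let child := S.getD (p ++ [ch]) pvNode0
      if child.isEnd then (acc.1 ++ [p ++ [ch]], pvUpd acc.2 child.word) else acc)
    (fun (s : List (List Char) × List Char) e =>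
      ((fun (l : List (List Char)) ch =>
          if (S.getD (p ++ [ch]) pvNode0).isEnd then l ++ [p ++ [ch]] else l) s.1 e,
       (fun (r : List Char) ch =>
          if (S.getD (p ++ [ch]) pvNode0).isEnd
          then pvUpd r (S.getD (p ++ [ch]) pvNode0).word else r) s.2 e))
    ([], res)
    (by
      intro acc ch _
      dsimp only
      split <;> rfl)
  rw [hbody, PySem.List.foldl_prod_mk
    (f := fun (l : List (List Char)) ch =>
      if (S.getD (p ++ [ch]) pvNode0).isEnd then l ++ [p ++ [ch]] else l)
    (g := fun (r : List Char) ch =>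
      if (S.getD (p ++ [ch]) pvNode0).isEnd
      then pvUpd r (S.getD (p ++ [ch]) pvNode0).word else r)]
  have h1 : List.foldl
      (fun (l : List (List Char)) ch =>
        if (S.getD (p ++ [ch]) pvNode0).isEnd then l ++ [p ++ [ch]] else l) []
      (PySem.List.sorted (S.getD p pvNode0).children (fun c => c) false) = pvNewq S p := by
    rw [PySem.List.foldl_append_if (fun ch => (S.getD (p ++ [ch]) pvNode0).isEnd)
      (fun ch => p ++ [ch])]
    rw [List.nil_append]
    rfl
  have h2 : List.foldl
      (fun (r : List Char) ch =>
        if (S.getD (p ++ [ch]) pvNode0).isEnd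
        then pvUpd r (S.getD (p ++ [ch]) pvNode0).word else r) res
      (PySem.List.sorted (S.getD p pvNode0).children (fun c => c) false)
      = List.foldl pvUpd res (pvNewq S p) := by
    rw [PySem.List.foldl_if_eq_foldl_filter (fun ch => (S.getD (p ++ [ch]) pvNode0).isEnd)
      (fun (r : List Char) ch => pvUpd r (S.getD (p ++ [ch]) pvNode0).word)]
    have hfk : List.filter (fun ch => (S.getD (p ++ [ch]) pvNode0).isEnd)
        (PySem.List.sorted (S.getD p pvNode0).children (fun c => c) false) = pvKidsEnd S p := rfl
    rw [hfk]
    rw [PySem.List.foldl_congr_mem (pvKidsEnd S p)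
      (fun (r : List Char) ch => pvUpd r (S.getD (p ++ [ch]) pvNode0).word)
      (fun (r : List Char) ch => pvUpd r (p ++ [ch])) res
      (by
        intro acc c hc
        obtain ⟨hcc, hcE⟩ := pvKidsEnd_mem h p hp c hc
        dsimp only
        rw [h.word_eq _ hcc hcE])]
    rw [pvNewq, List.foldl_map]
  rw [h1, h2]

lemma pvBFS_eq {S : PySem.Dict (List Char) PVNode} {L : List (List Char)}
    (h : PVInv S L) (M : Nat) (hM : ∀ p : List Char, S.contains p = true → p.length < M) :
    ∀ (fuel : Nat) (queue : List (List Char)) (res : List Char),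
      (∀ p ∈ queue, S.contains p = true) →
      queue.length + (queue.flatMap (pvDesc S M)).length ≤ fuel →
      pvBFS S fuel queue res = List.foldl pvUpd res (queue.flatMap (pvDesc S M)) := by
  intro fuel
  induction fuel with
  | zero =>
    intro queue res hkeys hfuel
    have hq : queue = [] := List.eq_nil_of_length_eq_zero (by omega)
    subst hq
    simp [pvBFS]
  | succ fuel ih =>
    intro queue res hkeys hfuel
    match queue with
    | [] => simp [pvBFS]
    | p :: qs =>
      have hp := hkeys p (List.mem_cons_self ..)
      have hpM := hM p hp
      show pvBFS S (fuel + 1) (p :: qs) res = _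
      rw [pvBFS]
      dsimp only
      rw [pvStep_eq h p hp res]
      have hkeys' : ∀ q ∈ qs ++ pvNewq S p, S.contains q = true := by
        intro q hq
        rcases List.mem_append.mp hq with hq | hq
        · exact hkeys q (List.mem_cons_of_mem _ hq)
        · rw [pvNewq, List.mem_map] at hq
          obtain ⟨c, hc, rfl⟩ := hq
          exact (pvKidsEnd_mem h p hp c hc).1
      have hlen := pvDesc_length S M p hpM
      have hfuel' : (qs ++ pvNewq S p).length
          + ((qs ++ pvNewq S p).flatMap (pvDesc S M)).length ≤ fuel := by
        rw [List.length_append, List.flatMap_append, List.length_append]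
        rw [List.flatMap_cons, List.length_append] at hfuel
        simp only [List.length_cons] at hfuel
        omega
      rw [ih (qs ++ pvNewq S p) (List.foldl pvUpd res (pvNewq S p)) hkeys' hfuel']
      rw [← List.foldl_append]
      apply pvFold_set
      intro x
      rw [List.flatMap_cons]
      simp only [List.mem_append, List.mem_flatMap]
      rw [pvDesc_mem S M p hpM x]
      constructor
      · rintro (hx | ⟨q, hq, hx⟩)
        · exact Or.inl (Or.inl hx)
        · rcases hq with hq | hq
          · exact Or.inr ⟨q, hq, hx⟩
          · exact Or.inl (Or.inr ⟨q, hq, hx⟩)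
      · rintro ((hx | ⟨q, hq, hx⟩) | ⟨q, hq, hx⟩)
        · exact Or.inl hx
        · exact Or.inr ⟨q, Or.inr hq, hx⟩
        · exact Or.inr ⟨q, Or.inl hq, hx⟩

-- ---------- assembling port A ----------

def pvM (S : PySem.Dict (List Char) PVNode) : Nat :=
  ((S.keys.map List.length).foldl max 0) + 1

lemma pvM_spec (S : PySem.Dict (List Char) PVNode) :
    ∀ p : List Char, S.contains p = true → p.length < pvM S := by
  intro p hp
  have hm : p ∈ S.keys := (PySem.Dict.contains_iff_mem_keys S p).mp hp
  have : p.length ≤ (S.keys.map List.length).foldl max 0 :=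
    (PySem.List.le_foldl_max (S.keys.map List.length) 0).2 p.length
      (List.mem_map_of_mem hm)
  unfold pvM
  omega

lemma pvDesc_count {S : PySem.Dict (List Char) PVNode} {L : List (List Char)}
    (h : PVInv S L) :
    (pvDesc S (pvM S) []).length + 1 ≤ S.size := by
  have hM := pvM_spec S
  have hp := h.root
  obtain ⟨hprops, hnd⟩ := pvDesc_props h (pvM S) hM (pvM S) [] (by simp) hp
  have hsub : ([] :: pvDesc S (pvM S) []) ⊆ S.keys := by
    intro q hq
    rw [List.mem_cons] at hq
    rcases hq with rfl | hq
    · exact (PySem.Dict.contains_iff_mem_keys S []).mp hp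
    · exact (PySem.Dict.contains_iff_mem_keys S q).mp (hprops q hq).1
  have hnodup : ([] :: pvDesc S (pvM S) []).Nodup := by
    rw [List.nodup_cons]
    refine ⟨?_, hnd⟩
    intro hmem
    have := (hprops [] hmem).2.2.2
    simp at this
  have hle := (hnodup.subperm hsub).length_le
  have hkeys : S.keys.length = S.size := by
    simp [PySem.Dict.keys, PySem.Dict.size]
  simp only [List.length_cons] at hle
  omega

lemma pvA_eq (arr : List String) :
    longestString arr = String.ofList
      (List.foldl pvUpd [] (pvDesc (pvBuild arr) (pvM (pvBuild arr)) [])) := by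
  have hInv := pvInv_build arr
  have hM := pvM_spec (pvBuild arr)
  unfold longestString
  dsimp only
  rw [pvBFS_eq hInv (pvM (pvBuild arr)) hM (pvBuild arr).size [[]] []
    (by
      intro q hq
      rw [List.mem_singleton] at hq
      rw [hq]
      exact hInv.root)
    (by
      have := pvDesc_count hInv
      simp only [List.length_cons, List.length_nil, List.flatMap_cons, List.flatMap_nil,
        List.append_nil]
      omega)]
  simp only [List.flatMap_cons, List.flatMap_nil, List.append_nil]

-- ---------- glue: the two folds range over the same set ----------

lemma pvSets_eq (arr : List String) (x : List Char) :
    x ∈ pvDesc (pvBuild arr) (pvM (pvBuild arr)) [] ↔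
      x ∈ ((pvArrL arr).filter (pvValidB arr)).filter (fun w => !w.isEmpty) := by
  have hInv := pvInv_build arr
  have hM := pvM_spec (pvBuild arr)
  constructor
  · intro hx
    have h1 := pvDesc_chain hInv (pvM (pvBuild arr)) hM (pvM (pvBuild arr)) [] (by simp)
      hInv.root
      (by
        intro k hk1 hk2
        simp only [List.length_nil] at hk2
        exact absurd hk1 (by omega)) x hx
    have h2 := (pvDesc_props hInv (pvM (pvBuild arr)) hM (pvM (pvBuild arr)) [] (by simp)
      hInv.root).1 x hx
    rw [List.mem_filter, List.mem_filter]
    refine ⟨⟨h1.1, ?_⟩, ?_⟩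
    · rw [pvValidB, List.all_eq_true]
      intro j hj
      rw [List.mem_range] at hj
      simp only [decide_eq_true_eq]
      exact h1.2 (j + 1) (by omega) (by omega)
    · have hlen := h2.2.2.2
      simp only [List.length_nil] at hlen
      rcases x with _ | ⟨a, t⟩
      · simp at hlen
      · simp
  · intro hx
    rw [List.mem_filter] at hx
    obtain ⟨hx1, hxne⟩ := hx
    rw [List.mem_filter] at hx1
    obtain ⟨hmem, hvalid⟩ := hx1
    have hne : x ≠ [] := by
      intro e
      rw [e] at hxne
      simp at hxne
    have hchain : ∀ k : Nat, 1 ≤ k → k ≤ (([] : List Char) ++ x).length →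
        ((([] : List Char) ++ x)).take k ∈ pvArrL arr := by
      intro k hk1 hk2
      simp only [List.nil_append] at hk2 ⊢
      rw [pvValidB, List.all_eq_true] at hvalid
      have := hvalid (k - 1) (by rw [List.mem_range]; omega)
      simp only [decide_eq_true_eq] at this
      rwa [show k - 1 + 1 = k from by omega] at this
    have := pvDesc_complete hInv (pvM (pvBuild arr)) hM x [] hInv.root hne
      (by simpa using hmem) hchain
    simpa using this

-- ===== VERDICT (by name: the statement is the Claim_ definition above) =====
theorem longestString_spec : Claim_equal_longestString := by
  unfold Claim_equal_longestString
  intro arr _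
  unfold Spec_longestString
  rw [pvA_eq, pvB_eq]
  congr 1
  rw [pvFold_filter_nil [] ((pvArrL arr).filter (pvValidB arr))]
  exact pvFold_set _ _ _ (pvSets_eq arr)
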